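-- pv_equiv track=rewrite | github.com/xiejiati/realSaraly | util.py | cmp_fun
-- ===== SOURCE A (Python) =====
-- def cmp_fun(e1, e2, sort_array):
--     e1_index = -1
--     e2_index = -1
--     i = 0
--     size = len(sort_array)
--     while i < size:
--         if e1 == sort_array[i]:
--             e1_index = i
--         if e2 == sort_array[i]:
--             e2_index = i
--         i += 1
--     if e1_index < e2_index:
--         return -1
--     elif e1_index > e2_index:
--         return 1
--     return 0
-- ===== SOURCE B (Python) =====
-- def _last_index(e, arr):
--     for j in range(len(arr) - 1, -1, -1):
--         if e == arr[j]:
--             return j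
--     return -1
--
--
-- def cmp_fun(e1, e2, sort_array):
--     i1 = _last_index(e1, sort_array)
--     i2 = _last_index(e2, sort_array)
--     if i1 < i2:
--         return -1
--     if i1 > i2:
--         return 1
--     return 0
-- ===== Notes on version B (the rewrite author's own statement) =====
-- stated objective: alternative
-- what changed: Replaces A's single forward scan that tests every element against both e1 and e2 with a backward-scan helper that breaks at the first match (last index) and is called once per element; indices are then compared.
import Mathlib
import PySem

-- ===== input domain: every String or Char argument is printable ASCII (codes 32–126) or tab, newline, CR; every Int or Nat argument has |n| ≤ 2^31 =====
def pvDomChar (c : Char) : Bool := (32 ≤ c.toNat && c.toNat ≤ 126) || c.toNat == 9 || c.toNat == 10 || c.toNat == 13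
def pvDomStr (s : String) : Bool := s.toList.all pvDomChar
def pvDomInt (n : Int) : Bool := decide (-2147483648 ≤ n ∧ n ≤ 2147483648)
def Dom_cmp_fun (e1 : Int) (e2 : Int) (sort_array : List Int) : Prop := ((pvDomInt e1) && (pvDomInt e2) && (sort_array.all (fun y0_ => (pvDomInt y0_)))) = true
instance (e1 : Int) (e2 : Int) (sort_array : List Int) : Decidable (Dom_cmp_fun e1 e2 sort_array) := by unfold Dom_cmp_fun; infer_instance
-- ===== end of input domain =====

-- B replaces A's single forward scan updating both indices with a backward-scan
-- helper (first match from the back = last index) called once per element; an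
-- alternative decomposition, same O(n) cost.

-- ===== PORT A =====
-- the while loop: one forward pass, index i, both accumulators updated each step
def cmpLoop (e1 e2 : Int) : List Int → Int → Int → Int → Int × Int
  | [], _, a, b => (a, b)
  | x :: xs, i, a, b =>
      cmpLoop e1 e2 xs (i + 1) (if e1 = x then i else a) (if e2 = x then i else b)

def cmp_fun (e1 : Int) (e2 : Int) (sort_array : List Int) : Int :=
  let p := cmpLoop e1 e2 sort_array 0 (-1) (-1)
  if p.1 < p.2 then -1 else if p.1 > p.2 then 1 else 0

-- ===== PORT B =====
-- backward scan: walk the reversed list carrying the current (descending) index j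
def lastIndexAux (e : Int) : List Int → Int → Int
  | [], _ => -1
  | x :: xs, j => if e = x then j else lastIndexAux e xs (j - 1)

def last_index (e : Int) (arr : List Int) : Int :=
  lastIndexAux e arr.reverse ((arr.length : Int) - 1)

def cmp_fun_alt (e1 : Int) (e2 : Int) (sort_array : List Int) : Int :=
  let i1 := last_index e1 sort_array
  let i2 := last_index e2 sort_array
  if i1 < i2 then -1 else if i1 > i2 then 1 else 0

-- ===== PRECONDITION & SPEC =====
def Spec_cmp_fun (e1 : Int) (e2 : Int) (sort_array : List Int) (out : Int) : Prop := out = cmp_fun_alt e1 e2 sort_array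
instance (e1 : Int) (e2 : Int) (sort_array : List Int) (out : Int) : Decidable (Spec_cmp_fun e1 e2 sort_array out) := by unfold Spec_cmp_fun; infer_instance

-- ===== CLAIM (what is proved, stated in full; the proofs are below) =====
def Claim_equal_cmp_fun : Prop := ∀ (e1 : Int) (e2 : Int) (sort_array : List Int), Dom_cmp_fun e1 e2 sort_array → Spec_cmp_fun e1 e2 sort_array (cmp_fun e1 e2 sort_array)

-- ===== LEMMAS AND PROOFS =====

-- single-accumulator version of A's loop (component of the pair)
def fwd (e : Int) : List Int → Int → Int → Int
  | [], _, a => a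
  | x :: xs, i, a => fwd e xs (i + 1) (if e = x then i else a)

theorem cmpLoop_eq_fwd (e1 e2 : Int) (l : List Int) :
    ∀ (i a b : Int), cmpLoop e1 e2 l i a b = (fwd e1 l i a, fwd e2 l i b) := by
  induction l with
  | nil => intro i a b; rfl
  | cons x xs ih => intro i a b; simp [cmpLoop, fwd, ih]

theorem fwd_append (e : Int) (l1 l2 : List Int) :
    ∀ (i a : Int), fwd e (l1 ++ l2) i a = fwd e l2 (i + (l1.length : Int)) (fwd e l1 i a) := by
  induction l1 with
  | nil => intro i a; simp [fwd]
  | cons x xs ih =>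
      intro i a
      simp only [List.cons_append, fwd, ih, List.length_cons]
      congr 1
      push_cast
      ring

theorem fwd_eq_last_index (e : Int) (l : List Int) :
    fwd e l 0 (-1) = last_index e l := by
  induction l using List.reverseRecOn with
  | nil => rfl
  | append_singleton l' x ih =>
      rw [fwd_append]
      simp only [fwd, last_index, List.reverse_append, List.reverse_singleton,
        List.singleton_append, List.length_append, List.length_singleton, lastIndexAux]
      rw [ih]
      simp only [last_index]
      by_cases h : e = x <;> simp [h]

theorem cmp_fun_spec : Claim_equal_cmp_fun := by
  intro e1 e2 l _
  unfold Spec_cmp_fun cmp_fun cmp_fun_alt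
  rw [cmpLoop_eq_fwd, fwd_eq_last_index, fwd_eq_last_index]
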